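-- pv_equiv track=rewrite | github.com/kitao/pyxel-mcp | src/pyxel_mcp/server.py | _analyze_intervals
-- ===== SOURCE A (Python) =====
-- def _analyze_intervals(midi_notes):
--     """Classify intervals between consecutive notes."""
--     if len(midi_notes) < 2:
--         return {}
--     counts = {"step (1-2)": 0, "skip (3-4)": 0, "leap (5-7)": 0, "jump (8+)": 0}
--     for i in range(1, len(midi_notes)):
--         diff = abs(midi_notes[i] - midi_notes[i - 1])
--         if diff <= 2:
--             counts["step (1-2)"] += 1
--         elif diff <= 4:
--             counts["skip (3-4)"] += 1
--         elif diff <= 7: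
--             counts["leap (5-7)"] += 1
--         else:
--             counts["jump (8+)"] += 1
--     return counts
-- ===== SOURCE B (Python) =====
-- def _analyze_intervals(midi_notes):
--     """Classify intervals between consecutive notes."""
--     if len(midi_notes) < 2:
--         return {}
--     diffs = [abs(b - a) for a, b in zip(midi_notes, midi_notes[1:])]
--     c2 = sum(1 for d in diffs if d <= 2)
--     c4 = sum(1 for d in diffs if d <= 4)
--     c7 = sum(1 for d in diffs if d <= 7)
--     return {
--         "step (1-2)": c2,
--         "skip (3-4)": c4 - c2,
--         "leap (5-7)": c7 - c4,
--         "jump (8+)": len(diffs) - c7,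
--     }
-- ===== Notes on version B (the rewrite author's own statement) =====
-- stated objective: alternative
-- what changed: Replaces A's single pass that classifies each interval with an if/elif cascade into a pre-seeded dict by a staged cumulative-count (CDF) computation: build the diff list once, count how many diffs are <= 2, <= 4 and <= 7 in separate passes without any per-element bucket branch, and derive each bucket as a difference of consecutive cumulative counts.
import Mathlib
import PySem

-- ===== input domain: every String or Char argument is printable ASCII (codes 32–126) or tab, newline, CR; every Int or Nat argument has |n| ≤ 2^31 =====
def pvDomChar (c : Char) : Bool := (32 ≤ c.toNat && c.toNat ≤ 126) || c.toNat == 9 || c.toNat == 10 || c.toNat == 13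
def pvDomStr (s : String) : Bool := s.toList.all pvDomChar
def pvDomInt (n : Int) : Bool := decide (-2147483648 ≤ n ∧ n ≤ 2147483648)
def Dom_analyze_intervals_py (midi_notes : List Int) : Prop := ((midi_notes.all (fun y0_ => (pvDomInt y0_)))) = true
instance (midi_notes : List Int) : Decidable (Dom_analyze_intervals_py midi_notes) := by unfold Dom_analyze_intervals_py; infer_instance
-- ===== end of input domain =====

-- B replaces A's per-interval if/elif classification into an in-place dict by a staged
-- cumulative-count computation: build the diff list once, count diffs <= 2, <= 4, <= 7 in
-- separate passes, and derive each bucket as a difference of cumulative counts (alternative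
-- decomposition, same O(n) cost).


-- ===== PORT A =====
-- midi_notes[i] / midi_notes[i-1]: i ranges over 1..len-1, always in range, so pyGetD is exact.
def analyze_intervals_py (midi_notes : List Int) : List (String × Int) :=
  if midi_notes.length < 2 then []
  else
    let counts : PySem.Dict String Int :=
      PySem.Dict.ofList [("step (1-2)", 0), ("skip (3-4)", 0), ("leap (5-7)", 0), ("jump (8+)", 0)]
    let final := (PySem.List.pyRange 1 (midi_notes.length : Int) 1).foldl
      (fun counts i =>
        let diff := |PySem.List.pyGetD midi_notes i 0 - PySem.List.pyGetD midi_notes (i - 1) 0|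
        if diff ≤ 2 then counts.modify "step (1-2)" 0 (· + 1)
        else if diff ≤ 4 then counts.modify "skip (3-4)" 0 (· + 1)
        else if diff ≤ 7 then counts.modify "leap (5-7)" 0 (· + 1)
        else counts.modify "jump (8+)" 0 (· + 1)) counts
    final.items

-- ===== PORT B =====
-- sum(1 for d in diffs if d <= k) is ported as the obvious conditional-add fold; the final dict
-- literal has four distinct literal keys, so its association list is the list written here.
def analyze_intervals_py_alt (midi_notes : List Int) : List (String × Int) :=
  if midi_notes.length < 2 then []
  else
    let diffs := (midi_notes.zip (PySem.List.slice midi_notes (some 1) none)).map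
      (fun p => |p.2 - p.1|)
    let c2 := diffs.foldl (fun s d => if d ≤ 2 then s + 1 else s) (0 : Int)
    let c4 := diffs.foldl (fun s d => if d ≤ 4 then s + 1 else s) (0 : Int)
    let c7 := diffs.foldl (fun s d => if d ≤ 7 then s + 1 else s) (0 : Int)
    [("step (1-2)", c2), ("skip (3-4)", c4 - c2), ("leap (5-7)", c7 - c4),
     ("jump (8+)", (diffs.length : Int) - c7)]

-- ===== PRECONDITION & SPEC =====
def Spec_analyze_intervals_py (midi_notes : List Int) (out : List (String × Int)) : Prop := out = analyze_intervals_py_alt midi_notes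
instance (midi_notes : List Int) (out : List (String × Int)) : Decidable (Spec_analyze_intervals_py midi_notes out) := by unfold Spec_analyze_intervals_py; infer_instance

-- ===== CLAIM (what is proved, stated in full; the proofs are below) =====
def Claim_equal_analyze_intervals_py : Prop := ∀ (midi_notes : List Int), Dom_analyze_intervals_py midi_notes → Spec_analyze_intervals_py midi_notes (analyze_intervals_py midi_notes)

-- ===== LEMMAS AND PROOFS =====

-- number of elements ≤ x, the value B's counting folds compute
def pvCnt (x : Int) (l : List Int) : Int := ((l.filter (fun d => d ≤ x)).length : Int)

-- B's conditional-add fold computes pvCnt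
lemma pvSumFold (x : Int) (l : List Int) : ∀ s : Int,
    l.foldl (fun s d => if d ≤ x then s + 1 else s) s = s + pvCnt x l := by
  induction l with
  | nil => intro s; simp [pvCnt]
  | cons a t ih =>
    intro s
    by_cases h : a ≤ x
    · simp [pvCnt, h, ih]; ring
    · simp [pvCnt, h, ih]

-- common bucket update on a quadruple of counters (A's loop body, dict state spelled out)
def pvBump (q : Int × Int × Int × Int) (diff : Int) : Int × Int × Int × Int :=
  if diff ≤ 2 then (q.1 + 1, q.2.1, q.2.2.1, q.2.2.2)
  else if diff ≤ 4 then (q.1, q.2.1 + 1, q.2.2.1, q.2.2.2)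
  else if diff ≤ 7 then (q.1, q.2.1, q.2.2.1 + 1, q.2.2.2)
  else (q.1, q.2.1, q.2.2.1, q.2.2.2 + 1)

-- one in-place bump of each key of A's literal four-key dict
lemma pvMod0 (a b c d : Int) :
    PySem.Dict.modify (PySem.Dict.mk [("step (1-2)", a), ("skip (3-4)", b), ("leap (5-7)", c), ("jump (8+)", d)]) "step (1-2)" 0 (· + 1)
    = PySem.Dict.mk [("step (1-2)", a + 1), ("skip (3-4)", b), ("leap (5-7)", c), ("jump (8+)", d)] := by
  simp [PySem.Dict.modify, PySem.Dict.getD, PySem.Dict.get?, PySem.Dict.insert]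

lemma pvMod1 (a b c d : Int) :
    PySem.Dict.modify (PySem.Dict.mk [("step (1-2)", a), ("skip (3-4)", b), ("leap (5-7)", c), ("jump (8+)", d)]) "skip (3-4)" 0 (· + 1)
    = PySem.Dict.mk [("step (1-2)", a), ("skip (3-4)", b + 1), ("leap (5-7)", c), ("jump (8+)", d)] := by
  simp [PySem.Dict.modify, PySem.Dict.getD, PySem.Dict.get?, PySem.Dict.insert]

lemma pvMod2 (a b c d : Int) :
    PySem.Dict.modify (PySem.Dict.mk [("step (1-2)", a), ("skip (3-4)", b), ("leap (5-7)", c), ("jump (8+)", d)]) "leap (5-7)" 0 (· + 1)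
    = PySem.Dict.mk [("step (1-2)", a), ("skip (3-4)", b), ("leap (5-7)", c + 1), ("jump (8+)", d)] := by
  simp [PySem.Dict.modify, PySem.Dict.getD, PySem.Dict.get?, PySem.Dict.insert]

lemma pvMod3 (a b c d : Int) :
    PySem.Dict.modify (PySem.Dict.mk [("step (1-2)", a), ("skip (3-4)", b), ("leap (5-7)", c), ("jump (8+)", d)]) "jump (8+)" 0 (· + 1)
    = PySem.Dict.mk [("step (1-2)", a), ("skip (3-4)", b), ("leap (5-7)", c), ("jump (8+)", d + 1)] := by
  simp [PySem.Dict.modify, PySem.Dict.getD, PySem.Dict.get?, PySem.Dict.insert]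

-- A's loop over a list of diffs, with the dict state spelled out
lemma foldA (diffs : List Int) : ∀ (a b c d : Int),
    diffs.foldl
      (fun counts diff =>
        if diff ≤ 2 then PySem.Dict.modify counts "step (1-2)" 0 (· + 1)
        else if diff ≤ 4 then PySem.Dict.modify counts "skip (3-4)" 0 (· + 1)
        else if diff ≤ 7 then PySem.Dict.modify counts "leap (5-7)" 0 (· + 1)
        else PySem.Dict.modify counts "jump (8+)" 0 (· + 1))
      (PySem.Dict.mk [("step (1-2)", a), ("skip (3-4)", b), ("leap (5-7)", c), ("jump (8+)", d)])
    = PySem.Dict.mk [("step (1-2)", (diffs.foldl pvBump (a, b, c, d)).1),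
        ("skip (3-4)", (diffs.foldl pvBump (a, b, c, d)).2.1),
        ("leap (5-7)", (diffs.foldl pvBump (a, b, c, d)).2.2.1),
        ("jump (8+)", (diffs.foldl pvBump (a, b, c, d)).2.2.2)] := by
  induction diffs with
  | nil => intro a b c d; rfl
  | cons x t ih =>
    intro a b c d
    simp only [List.foldl_cons, pvBump]
    split_ifs with h1 h2 h3
    · rw [pvMod0]; exact ih (a + 1) b c d
    · rw [pvMod1]; exact ih a (b + 1) c d
    · rw [pvMod2]; exact ih a b (c + 1) d
    · rw [pvMod3]; exact ih a b c (d + 1)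

-- A's bucket fold, expressed as differences of B's cumulative counts
lemma pvBump_cdf (diffs : List Int) : ∀ (a b c d : Int),
    diffs.foldl pvBump (a, b, c, d)
    = (a + pvCnt 2 diffs, b + (pvCnt 4 diffs - pvCnt 2 diffs),
       c + (pvCnt 7 diffs - pvCnt 4 diffs), d + ((diffs.length : Int) - pvCnt 7 diffs)) := by
  induction diffs with
  | nil => intro a b c d; simp [pvCnt]
  | cons x t ih =>
    intro a b c d
    have cnt_cons : ∀ y : Int, pvCnt y (x :: t) = (if x ≤ y then 1 else 0) + pvCnt y t := by
      intro y
      by_cases h : x ≤ y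
      · simp [pvCnt, h]; ring
      · simp [pvCnt, h]
    simp only [List.foldl_cons, pvBump]
    split_ifs with h1 h2 h3 <;> rw [ih] <;>
      simp only [cnt_cons, List.length_cons, Prod.mk.injEq] <;>
      refine ⟨?_, ?_, ?_, ?_⟩ <;> (split_ifs <;> omega)

-- the diffs list A reads through indices equals the diffs list B reads through zip
lemma diffs_eq (xs : List Int) :
    (PySem.List.pyRange 1 (xs.length : Int) 1).map
      (fun i => |PySem.List.pyGetD xs i 0 - PySem.List.pyGetD xs (i - 1) 0|)
    = (xs.zip xs.tail).map (fun p => |p.2 - p.1|) := by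
  apply List.ext_getElem
  · simp [PySem.List.length_pyRange_one, List.length_zip, List.length_tail]
  · intro k hk1 hk2
    have hkr : k < (PySem.List.pyRange 1 (xs.length : Int) 1).length := by
      simpa using hk1
    have hk : k < xs.length - 1 := by
      simp [PySem.List.length_pyRange_one] at hkr; omega
    simp only [List.getElem_map]
    have hget : (PySem.List.pyRange 1 (xs.length : Int) 1)[k] = 1 + (k : Int) :=
      PySem.List.getElem_pyRange_one (h := hkr)
    rw [hget]
    have e1 : PySem.List.pyGetD xs (1 + (k : Int)) 0 = xs[k + 1]'(by omega) := by
      have : (1 : Int) + (k : Int) = ((k + 1 : Nat) : Int) := by push_cast; ring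
      rw [this, PySem.List.pyGetD_natCast]
      simp [List.getD, List.getElem?_eq_getElem (by omega : k + 1 < xs.length)]
    have e2 : PySem.List.pyGetD xs (1 + (k : Int) - 1) 0 = xs[k]'(by omega) := by
      have : (1 : Int) + (k : Int) - 1 = ((k : Nat) : Int) := by ring
      rw [this, PySem.List.pyGetD_natCast]
      simp [List.getD, List.getElem?_eq_getElem (by omega : k < xs.length)]
    rw [e1, e2, List.getElem_zip]
    simp [List.getElem_tail]

-- ===== VERDICT (by name: the statement is the Claim_ definition above) =====
theorem analyze_intervals_py_spec : Claim_equal_analyze_intervals_py := by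
  intro xs _
  unfold Spec_analyze_intervals_py analyze_intervals_py analyze_intervals_py_alt
  by_cases hlen : xs.length < 2
  · simp [hlen]
  · simp only [hlen, if_neg, not_false_iff]
    rw [PySem.List.slice_from_one]
    have hofList : PySem.Dict.ofList [("step (1-2)", (0 : Int)), ("skip (3-4)", 0), ("leap (5-7)", 0), ("jump (8+)", 0)]
        = PySem.Dict.mk [("step (1-2)", 0), ("skip (3-4)", 0), ("leap (5-7)", 0), ("jump (8+)", 0)] := by
      decide
    rw [hofList]
    have hA : List.foldl
        (fun (counts : PySem.Dict String Int) (i : Int) =>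
          if |PySem.List.pyGetD xs i 0 - PySem.List.pyGetD xs (i - 1) 0| ≤ 2 then
            counts.modify "step (1-2)" 0 (· + 1)
          else if |PySem.List.pyGetD xs i 0 - PySem.List.pyGetD xs (i - 1) 0| ≤ 4 then
            counts.modify "skip (3-4)" 0 (· + 1)
          else if |PySem.List.pyGetD xs i 0 - PySem.List.pyGetD xs (i - 1) 0| ≤ 7 then
            counts.modify "leap (5-7)" 0 (· + 1)
          else counts.modify "jump (8+)" 0 (· + 1))
        (PySem.Dict.mk [("step (1-2)", 0), ("skip (3-4)", 0), ("leap (5-7)", 0), ("jump (8+)", 0)])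
        (PySem.List.pyRange 1 (xs.length : Int) 1)
      = List.foldl
        (fun (counts : PySem.Dict String Int) (diff : Int) =>
          if diff ≤ 2 then counts.modify "step (1-2)" 0 (· + 1)
          else if diff ≤ 4 then counts.modify "skip (3-4)" 0 (· + 1)
          else if diff ≤ 7 then counts.modify "leap (5-7)" 0 (· + 1)
          else counts.modify "jump (8+)" 0 (· + 1))
        (PySem.Dict.mk [("step (1-2)", 0), ("skip (3-4)", 0), ("leap (5-7)", 0), ("jump (8+)", 0)])
        ((xs.zip xs.tail).map (fun p => |p.2 - p.1|)) := by
      rw [← diffs_eq xs, List.foldl_map]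
    rw [hA, foldA, pvBump_cdf]
    rw [pvSumFold 2, pvSumFold 4, pvSumFold 7]
    simp
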